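-- pv_equiv track=rewrite | github.com/sonam4990/LeetCode | 0788-rotated-digits/0788-rotated-digits.py | rotatedDigits
-- ===== SOURCE A (Python) =====
-- def rotatedDigits(n: int) -> int:
--
--     # valid rotations
--     valid = {'0', '1', '2', '5', '6', '8', '9'}
--
--     # digits that change after rotation
--     change = {'2', '5', '6', '9'}
--
--     count = 0
--
--     for num in range(1, n + 1):
--
--         s = str(num)
--
--         is_valid = True
--         is_changed = False
--
--         for ch in s:
--
--             # invalid digit
--             if ch not in valid:
--                 is_valid = False
--                 break
--
--             # becomes different after rotation
--             if ch in change: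
--                 is_changed = True
--
--         # good number
--         if is_valid and is_changed:
--             count += 1
--
--     return count
-- ===== SOURCE B (Python) =====
-- def rotatedDigits(n: int) -> int:
--     # O(n) dynamic programming: reuse the already-computed state of the prefix (last digit removed)
--     # instead of re-scanning every digit of every number.
--     # state meanings: 0 = contains an invalid digit, 1 = rotates to itself, 2 = good
--     state = [1] * (n + 1)
--     count = 0
--     for num in range(1, n + 1):
--         q, d = divmod(num, 10)
--         if d in (3, 4, 7) or state[q] == 0:
--             state[num] = 0
--         elif d in (2, 5, 6, 9) or state[q] == 2:
--             state[num] = 2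
--             count += 1
--         else:
--             state[num] = 1
--     return count
-- ===== Notes on version B (the rewrite author's own statement) =====
-- stated objective: faster
-- what changed: B replaces A's per-number string conversion and digit scan with an O(n) dynamic program that derives each number's valid/changed state from the already-computed state of the number with its last digit removed, counting good numbers in one pass.
import Mathlib
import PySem

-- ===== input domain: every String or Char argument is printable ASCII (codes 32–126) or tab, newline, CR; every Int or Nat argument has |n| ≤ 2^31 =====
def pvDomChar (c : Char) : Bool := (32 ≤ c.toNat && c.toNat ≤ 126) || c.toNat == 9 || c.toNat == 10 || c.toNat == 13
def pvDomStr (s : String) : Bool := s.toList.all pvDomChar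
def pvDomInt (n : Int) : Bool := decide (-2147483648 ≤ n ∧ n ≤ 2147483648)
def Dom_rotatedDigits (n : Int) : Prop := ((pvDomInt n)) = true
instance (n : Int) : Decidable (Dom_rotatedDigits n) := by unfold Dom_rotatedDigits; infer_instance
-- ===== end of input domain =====

-- B: O(n) dynamic programming deriving each number's state from that of the number with its last digit removed,
-- instead of A's per-number str() conversion and digit scan (measured faster).


-- ===== PORT A =====
-- ch in valid / ch in change (membership in the two literal digit sets)
def pvValid (ch : Char) : Bool :=
  ch == '0' || ch == '1' || ch == '2' || ch == '5' || ch == '6' || ch == '8' || ch == '9'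

def pvChange (ch : Char) : Bool :=
  ch == '2' || ch == '5' || ch == '6' || ch == '9'

-- A's inner `for ch in s` loop with its break, carrying (is_valid, is_changed)
def pvScan : List Char → Bool → Bool → Bool × Bool
  | [], v, c => (v, c)
  | ch :: t, v, c =>
      if !(pvValid ch) then (false, c)
      else pvScan t v (c || pvChange ch)

def rotatedDigits (n : Int) : Int :=
  (PySem.List.pyRange 1 (n + 1)).foldl
    (fun count num =>
      let s := PySem.Int.toChars num        -- s = str(num)
      let p := pvScan s true false
      if p.1 && p.2 then count + 1 else count)
    0

-- ===== PORT B =====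
-- the body of B's `for num in range(1, n+1)` loop (state list, count)
def pvBody (acc : Array Int × Int) (num : Int) : Array Int × Int :=
  let state := acc.1
  let count := acc.2
  let q := PySem.Int.floordiv num 10
  let d := PySem.Int.mod num 10
  if d == 3 || d == 4 || d == 7 || state.getD q.toNat 0 == 0 then
    (state.setIfInBounds num.toNat 0, count)
  else if d == 2 || d == 5 || d == 6 || d == 9 || state.getD q.toNat 0 == 2 then
    (state.setIfInBounds num.toNat 2, count + 1)
  else
    (state.setIfInBounds num.toNat 1, count)

def rotatedDigits_alt (n : Int) : Int :=
  -- state = [1] * (n + 1)   (empty when n + 1 ≤ 0, as in Python)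
  (((PySem.List.pyRange 1 (n + 1)).foldl pvBody (Array.replicate (n + 1).toNat 1, 0))).2

-- ===== PRECONDITION & SPEC =====
def Spec_rotatedDigits (n : Int) (out : Int) : Prop := out = rotatedDigits_alt n
instance (n : Int) (out : Int) : Decidable (Spec_rotatedDigits n out) := by unfold Spec_rotatedDigits; infer_instance

-- ===== CLAIM (what is proved, stated in full; the proofs are below) =====
def Claim_equal_rotatedDigits : Prop := ∀ (n : Int), Dom_rotatedDigits n → Spec_rotatedDigits n (rotatedDigits n)

-- ===== LEMMAS AND PROOFS =====

-- the state B's DP computes for m: 0 = invalid digit present, 2 = good, 1 = rotates to itself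
def pvClassify (m : Nat) : Int :=
  if m = 0 then 1
  else
    let s := pvClassify (m / 10)
    let d := m % 10
    if d = 3 ∨ d = 4 ∨ d = 7 ∨ s = 0 then 0
    else if d = 2 ∨ d = 5 ∨ d = 6 ∨ d = 9 ∨ s = 2 then 2
    else 1
decreasing_by exact Nat.div_lt_self (Nat.pos_of_ne_zero (by assumption)) (by norm_num)

-- number of good numbers in [1, k]
def pvCountG : Nat → Int
  | 0 => 0
  | k + 1 => pvCountG k + (if pvClassify (k + 1) = 2 then 1 else 0)

lemma pvClassify_pos (m : Nat) (hm : m ≠ 0) :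
    pvClassify m =
      (let s := pvClassify (m / 10)
       let d := m % 10
       if d = 3 ∨ d = 4 ∨ d = 7 ∨ s = 0 then 0
       else if d = 2 ∨ d = 5 ∨ d = 6 ∨ d = 9 ∨ s = 2 then 2
       else 1) := by
  rw [pvClassify]; simp [hm]

lemma toDigitsCore_shift (f : Nat) : ∀ (n : Nat) (ds : List Char),
    Nat.toDigitsCore 10 f n ds = Nat.toDigitsCore 10 f n [] ++ ds := by
  induction f with
  | zero => intro n ds; simp [Nat.toDigitsCore]
  | succ f ih =>
    intro n ds
    simp only [Nat.toDigitsCore]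
    by_cases h : n / 10 = 0
    · simp [h]
    · simp only [h, if_false]
      rw [ih (n / 10) (Nat.digitChar (n % 10) :: ds), ih (n / 10) [Nat.digitChar (n % 10)]]
      simp

lemma toDigitsCore_fuel (n : Nat) : ∀ (f f' : Nat), n < f → n < f' →
    Nat.toDigitsCore 10 f n [] = Nat.toDigitsCore 10 f' n [] := by
  induction n using Nat.strong_induction_on with
  | _ n ih =>
    intro f f' hf hf'
    cases f with
    | zero => omega
    | succ f =>
      cases f' with
      | zero => omega
      | succ f' =>
        simp only [Nat.toDigitsCore]
        by_cases h : n / 10 = 0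
        · simp [h]
        · simp only [h, if_false]
          rw [toDigitsCore_shift f, toDigitsCore_shift f']
          have hlt : n / 10 < n := Nat.div_lt_self (Nat.pos_of_ne_zero (by omega)) (by norm_num)
          rw [ih (n / 10) hlt f f' (by omega) (by omega)]

lemma toDigits_small (m : Nat) (h : m < 10) :
    Nat.toDigits 10 m = [Nat.digitChar m] := by
  have : m / 10 = 0 := Nat.div_eq_of_lt h
  simp [Nat.toDigits, Nat.toDigitsCore, this, Nat.mod_eq_of_lt h]

lemma toDigits_step (m : Nat) (h : 10 ≤ m) :
    Nat.toDigits 10 m = Nat.toDigits 10 (m / 10) ++ [Nat.digitChar (m % 10)] := by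
  have h0 : m / 10 ≠ 0 := by
    intro hc; have := Nat.div_eq_of_lt (show m < 10 by omega); omega
  show Nat.toDigitsCore 10 (m + 1) m [] = _
  simp only [Nat.toDigitsCore]
  have h0' : ¬ m / 10 = 0 := h0
  simp only [h0', if_false]
  rw [toDigitsCore_shift m (m / 10) [Nat.digitChar (m % 10)]]
  have hlt : m / 10 < m := Nat.div_lt_self (by omega) (by norm_num)
  rw [toDigitsCore_fuel (m / 10) m (m / 10 + 1) (by omega) (by omega)]
  rfl

lemma pvScan_append (ds es : List Char) : ∀ (c : Bool),
    pvScan (ds ++ es) true c =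
      (if (pvScan ds true c).1 then pvScan es true (pvScan ds true c).2
       else pvScan ds true c) := by
  induction ds with
  | nil => intro c; simp [pvScan]
  | cons ch t ih =>
    intro c
    by_cases h : pvValid ch
    · simp only [List.cons_append, pvScan, h, Bool.not_true, Bool.false_eq_true, if_false]
      exact ih _
    · simp [pvScan, h]

-- A's digit scan of str(m) computes exactly B's classification
lemma pvClassify_zero : pvClassify 0 = 1 := by rw [pvClassify]; simp

lemma scan_classify (m : Nat) (hm : m ≠ 0) :
    ((pvScan (Nat.toDigits 10 m) true false).1 = decide (pvClassify m ≠ 0)) ∧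
    (pvClassify m ≠ 0 →
      (pvScan (Nat.toDigits 10 m) true false).2 = decide (pvClassify m = 2)) := by
  induction m using Nat.strong_induction_on with
  | _ m ih =>
    by_cases hs : m < 10
    · have h1 : 1 ≤ m := Nat.pos_of_ne_zero hm
      interval_cases m <;>
        · rw [toDigits_small _ (by norm_num), pvClassify_pos _ (by norm_num)]
          norm_num [pvClassify_zero] <;> decide
    · push_neg at hs
      rw [toDigits_step m hs, pvScan_append]
      have hq : m / 10 ≠ 0 := by
        intro hc; have := Nat.div_eq_of_lt (show m < 10 by omega); omega
      have hlt : m / 10 < m := Nat.div_lt_self (by omega) (by norm_num)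
      obtain ⟨ih1, ih2⟩ := ih (m / 10) hlt hq
      rw [pvClassify_pos m hm]
      by_cases h0 : pvClassify (m / 10) = 0
      · have ih1' : (pvScan (Nat.toDigits 10 (m / 10)) true false).1 = false := by
          rw [ih1, h0]; simp
        simp [ih1', h0]
      · have ih1' : (pvScan (Nat.toDigits 10 (m / 10)) true false).1 = true := by
          rw [ih1]; simp [h0]
        have hpair : pvScan (Nat.toDigits 10 (m / 10)) true false
            = (true, decide (pvClassify (m / 10) = 2)) :=
          Prod.ext ih1' (ih2 h0)
        rw [hpair]
        clear ih ih1 ih2 ih1' hpair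
        have hd : m % 10 < 10 := Nat.mod_lt _ (by norm_num)
        generalize hdm : m % 10 = d at *
        by_cases h2 : pvClassify (m / 10) = 2 <;>
          · interval_cases d <;>
              simp [pvScan, pvValid, pvChange, Nat.digitChar, h0, h2]

-- ===== A-side: the fold over range(1, n+1) counts pvCountG =====
lemma A_fold (k : Nat) :
    (PySem.List.pyRange 1 ((k : Int) + 1)).foldl
      (fun count num =>
        let s := PySem.Int.toChars num
        let p := pvScan s true false
        if p.1 && p.2 then count + 1 else count)
      0 = pvCountG k := by
  induction k with
  | zero =>
    have : PySem.List.pyRange 1 ((0 : Int) + 1) = [] := by decide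
    simp [this, pvCountG]
  | succ k ih =>
    have hstep : PySem.List.pyRange 1 ((k : Int) + 1 + 1)
        = PySem.List.pyRange 1 ((k : Int) + 1) ++ [(k : Int) + 1] := by
      have := PySem.List.pyRange_one_succ_right (a := 1) (b := (k : Int) + 1) (by omega)
      simpa using this
    push_cast
    rw [hstep, List.foldl_append, ih]
    simp only [List.foldl]
    have hch : PySem.Int.toChars ((k : Int) + 1) = Nat.toDigits 10 (k + 1) := by
      rw [show ((k : Int) + 1) = ((k + 1 : Nat) : Int) by push_cast; ring]
      unfold PySem.Int.toChars
      rw [if_neg (by omega)]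
      simp
    rw [hch]
    obtain ⟨h1, h2⟩ := scan_classify (k + 1) (by omega)
    by_cases hc : pvClassify (k + 1) = 2
    · have hne : pvClassify (k + 1) ≠ 0 := by rw [hc]; norm_num
      simp [h1, h2 hne, hne, hc, pvCountG]
    · by_cases h0 : pvClassify (k + 1) = 0
      · simp [h1, h0, pvCountG, hc]
      · simp [h1, h2 h0, h0, hc, pvCountG]

-- ===== B-side: the DP invariant =====
-- state array after processing 1..k (size N+1): classify below/at k, untouched 1 above
def pvArr (N k : Nat) : Array Int :=
  Array.ofFn (n := N + 1) (fun i => if i.val ≤ k then pvClassify i.val else 1)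

lemma pvArr_getD (N k i : Nat) (hi : i ≤ N) :
    (pvArr N k).getD i 0 = if i ≤ k then pvClassify i else 1 := by
  have hsz : (pvArr N k).size = N + 1 := by simp [pvArr]
  rw [Array.getD]
  simp only [hsz]
  rw [dif_pos (by omega)]
  simp [pvArr]

lemma pvArr_zero (N : Nat) : pvArr N 0 = Array.replicate (N + 1) 1 := by
  apply Array.ext
  · simp [pvArr]
  · intro i h1 h2
    simp only [pvArr, Array.getElem_ofFn, Array.getElem_replicate]
    have : i ≤ 0 ↔ i = 0 := by omega
    rcases Nat.eq_zero_or_pos i with h | h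
    · simp [h, pvClassify]
    · simp [Nat.not_le.mpr h]

lemma pvBody_step (N k : Nat) (hk : k < N) :
    pvBody (pvArr N k, pvCountG k) ((k : Int) + 1)
      = (pvArr N (k + 1), pvCountG (k + 1)) := by
  have hcast : ((k : Int) + 1) = ((k + 1 : Nat) : Int) := by push_cast; ring
  have hq : PySem.Int.floordiv ((k : Int) + 1) 10 = (((k + 1) / 10 : Nat) : Int) := by
    rw [hcast]; exact_mod_cast PySem.Int.floordiv_natCast (k + 1) 10
  have hd : PySem.Int.mod ((k : Int) + 1) 10 = (((k + 1) % 10 : Nat) : Int) := by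
    rw [hcast]; exact_mod_cast PySem.Int.mod_natCast (k + 1) 10
  have hqle : (k + 1) / 10 ≤ k := by
    have := Nat.div_lt_self (show 0 < k + 1 by omega) (show 1 < 10 by norm_num)
    omega
  have hgetD : (pvArr N k).getD ((((k + 1) / 10 : Nat) : Int)).toNat 0
      = pvClassify ((k + 1) / 10) := by
    rw [Int.toNat_natCast, pvArr_getD N k _ (by omega)]
    simp [hqle]
  have harr : ∀ (v : Int),
      (pvArr N k).setIfInBounds ((((k : Int) + 1)).toNat) v
        = if v = pvClassify (k + 1) then pvArr N (k + 1) else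
            (pvArr N k).setIfInBounds ((((k : Int) + 1)).toNat) v := by
    intro v; by_cases hv : v = pvClassify (k + 1)
    · rw [if_pos hv]
      apply Array.ext
      · simp [pvArr, Array.size_setIfInBounds]
      · intro i h1 h2
        have hsz : i < N + 1 := by simpa [pvArr, Array.size_setIfInBounds] using h1
        rw [Array.getElem_setIfInBounds (show i < (pvArr N k).size by simpa [pvArr] using hsz)]
        have ht : (((k : Int) + 1)).toNat = k + 1 := by omega
        simp only [pvArr, Array.getElem_ofFn, ht]
        by_cases he : k + 1 = i
        · simp [he ▸ hv, ← he]
        · have : (i ≤ k) ↔ (i ≤ k + 1) := by omega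
          simp [he, this]
    · rw [if_neg hv]
  -- now unfold the body and case on the classification step
  have hcl := pvClassify_pos (k + 1) (by omega)
  simp only at hcl
  unfold pvBody
  simp only [hq, hd, hgetD]
  by_cases c1 : (k + 1) % 10 = 3 ∨ (k + 1) % 10 = 4 ∨ (k + 1) % 10 = 7 ∨ pvClassify ((k + 1) / 10) = 0
  · have hcv : pvClassify (k + 1) = 0 := by rw [hcl, if_pos c1]
    have hb : ((((k + 1) % 10 : Nat) : Int) == 3 || (((k + 1) % 10 : Nat) : Int) == 4
        || (((k + 1) % 10 : Nat) : Int) == 7 || pvClassify ((k + 1) / 10) == 0) = true := by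
      rcases c1 with h | h | h | h <;> simp [h]
    rw [if_pos hb]
    rw [harr 0, if_pos hcv.symm]
    have : pvCountG (k + 1) = pvCountG k := by simp [pvCountG, hcv]
    rw [this]
  · have hb : ((((k + 1) % 10 : Nat) : Int) == 3 || (((k + 1) % 10 : Nat) : Int) == 4
        || (((k + 1) % 10 : Nat) : Int) == 7 || pvClassify ((k + 1) / 10) == 0) = false := by
      push_neg at c1
      obtain ⟨a1, a2, a3, a4⟩ := c1
      simp only [Bool.or_eq_false_iff, beq_eq_false_iff_ne, ne_eq]
      refine ⟨⟨⟨?_, ?_⟩, ?_⟩, a4⟩ <;> omega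
    rw [if_neg (by simp only [hb]; simp)]
    by_cases c2 : (k + 1) % 10 = 2 ∨ (k + 1) % 10 = 5 ∨ (k + 1) % 10 = 6 ∨ (k + 1) % 10 = 9 ∨ pvClassify ((k + 1) / 10) = 2
    · have hcv : pvClassify (k + 1) = 2 := by rw [hcl, if_neg c1, if_pos c2]
      have hb2 : ((((k + 1) % 10 : Nat) : Int) == 2 || (((k + 1) % 10 : Nat) : Int) == 5
          || (((k + 1) % 10 : Nat) : Int) == 6 || (((k + 1) % 10 : Nat) : Int) == 9
          || pvClassify ((k + 1) / 10) == 2) = true := by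
        rcases c2 with h | h | h | h | h <;> simp [h]
      rw [if_pos hb2]
      rw [harr 2, if_pos hcv.symm]
      have : pvCountG (k + 1) = pvCountG k + 1 := by simp [pvCountG, hcv]
      rw [this]
    · have hcv : pvClassify (k + 1) = 1 := by rw [hcl, if_neg c1, if_neg c2]
      have hb2 : ((((k + 1) % 10 : Nat) : Int) == 2 || (((k + 1) % 10 : Nat) : Int) == 5
          || (((k + 1) % 10 : Nat) : Int) == 6 || (((k + 1) % 10 : Nat) : Int) == 9
          || pvClassify ((k + 1) / 10) == 2) = false := by
        push_neg at c2
        obtain ⟨a1, a2, a3, a4, a5⟩ := c2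
        simp only [Bool.or_eq_false_iff, beq_eq_false_iff_ne, ne_eq]
        refine ⟨⟨⟨⟨?_, ?_⟩, ?_⟩, ?_⟩, a5⟩ <;> omega
      rw [if_neg (by simp only [hb2]; simp)]
      rw [harr 1, if_pos hcv.symm]
      have : pvCountG (k + 1) = pvCountG k := by simp [pvCountG, hcv]
      rw [this]

lemma B_fold (N : Nat) (k : Nat) (hk : k ≤ N) :
    (PySem.List.pyRange 1 ((k : Int) + 1)).foldl pvBody (Array.replicate (N + 1) 1, 0)
      = (pvArr N k, pvCountG k) := by
  induction k with
  | zero =>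
    have : PySem.List.pyRange 1 ((0 : Int) + 1) = [] := by decide
    simp only [Nat.cast_zero, this, List.foldl_nil]
    rw [pvArr_zero]
    rfl
  | succ k ih =>
    have hstep : PySem.List.pyRange 1 ((k : Int) + 1 + 1)
        = PySem.List.pyRange 1 ((k : Int) + 1) ++ [(k : Int) + 1] := by
      have := PySem.List.pyRange_one_succ_right (a := 1) (b := (k : Int) + 1) (by omega)
      simpa using this
    push_cast
    rw [hstep, List.foldl_append, ih (by omega)]
    simpa using pvBody_step N k (by omega)

lemma pyRange_empty (a b : Int) (h : b ≤ a) : PySem.List.pyRange a b = [] := by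
  simp only [PySem.List.pyRange]
  rw [if_neg (by norm_num)]
  simp [Int.not_lt.mpr h]

-- ===== VERDICT (by name: the statement is the Claim_ definition above) =====
theorem rotatedDigits_spec : Claim_equal_rotatedDigits := by
  intro n _
  show rotatedDigits n = rotatedDigits_alt n
  rcases le_or_gt n 0 with hn | hn
  · have he : PySem.List.pyRange 1 (n + 1) = [] := pyRange_empty _ _ (by omega)
    simp [rotatedDigits, rotatedDigits_alt, he]
  · have hN : n = ((n.toNat : Nat) : Int) := by omega
    have hN1 : (n + 1).toNat = n.toNat + 1 := by omega
    unfold rotatedDigits rotatedDigits_alt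
    rw [hN1]
    calc (PySem.List.pyRange 1 (n + 1)).foldl _ 0
        = pvCountG n.toNat := by rw [show n + 1 = ((n.toNat : Nat) : Int) + 1 by omega]; exact A_fold n.toNat
      _ = ((PySem.List.pyRange 1 (n + 1)).foldl pvBody (Array.replicate (n.toNat + 1) 1, 0)).2 := by
          rw [show n + 1 = ((n.toNat : Nat) : Int) + 1 by omega,
            B_fold n.toNat n.toNat (le_refl _)]
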